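-- pv_equiv track=rewrite | github.com/ltfafei/py_Leetcode_study | Strings/13.compressStr_and_uncompreStr.py | uncompreStr
-- ===== SOURCE A (Python) =====
-- def uncompreStr(s):
--     res = ""
--     deep = 0
--     count = ""
--     chars = ""
--     #展开次数0-9的映射
--     nums = ["0", "1", "2", "3", "4", "5", "6", "7", "8", "9"]
--     for c in s:
--         if deep > 0:
--             chars += c
--         if c in nums and deep == 0:
--             count += c
--         #当前字符为[，进行递归
--         elif c == "[":
--             deep += 1
--         elif c == "]":
--             deep -= 1
--             if deep == 0:
--                 res += uncompreStr(chars) * int(count)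
--                 #制空
--                 chars = ""
--                 count = ""
--         elif deep == 0:
--             res += c
--     return res
-- ===== SOURCE B (Python) =====
-- def uncompreStr(s):
--     stack = []
--     digits = ""
--     cur = []
--     for c in s:
--         if c == "[":
--             stack.append((int(digits), cur))
--             digits = ""
--             cur = []
--         elif c == "]":
--             n, prev = stack.pop()
--             prev.extend(cur * n)
--             cur = prev
--             digits = ""
--         elif c.isdigit():
--             digits += c
--         else:
--             cur.append(c)
--     return "".join(cur)
-- ===== Notes on version B (the rewrite author's own statement) =====
-- stated objective: faster
-- what changed: A decodes by counting bracket depth, buffering each bracket group into a string and recursively re-decoding that buffer (re-scanning nested content once per nesting level); B is a single-pass stack machine that pushes (count, prefix) on '[' and pops and repeats on ']', never re-scanning. …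
-- outside the precondition, e.g. on uncompreStr('a]b'): A returns 'a', B raises IndexError; on uncompreStr('2[ab'): A returns '', B returns 'ab'; on uncompreStr(']'): A returns '', B raises IndexError
import Mathlib
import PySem

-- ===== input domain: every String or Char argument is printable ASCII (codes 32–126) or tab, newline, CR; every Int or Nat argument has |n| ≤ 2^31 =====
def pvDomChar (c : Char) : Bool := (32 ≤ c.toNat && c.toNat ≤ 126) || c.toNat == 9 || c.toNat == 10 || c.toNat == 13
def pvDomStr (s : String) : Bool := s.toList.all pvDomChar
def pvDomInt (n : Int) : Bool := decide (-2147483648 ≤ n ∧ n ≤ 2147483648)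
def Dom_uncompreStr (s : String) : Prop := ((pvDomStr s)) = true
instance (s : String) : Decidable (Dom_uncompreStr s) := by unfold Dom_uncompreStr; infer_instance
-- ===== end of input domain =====

-- B re-implements the bracket run-length decoder as a single-pass stack machine (no recursion,
-- no re-scan of the bracket body); the equivalence below covers well-formed encodings (Pre_).

-- ===== PORT A =====
-- A's loop state is (res, deep, count, chars); the recursive call `uncompreStr(chars)` is ported
-- with a fuel parameter as a totality guard (fuel |s|+2 is proved sufficient on Pre_ inputs);
-- `none` marks the paths where the Python raises (int of an empty count → ValueError, fuel exhaustion).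
def pvNums : List Char := ['0', '1', '2', '3', '4', '5', '6', '7', '8', '9']

def uRun : Nat → List Char → List Char → Int → List Char → List Char →
    Option (List Char × Int × List Char × List Char)
  | _, [], res, deep, count, chars => some (res, deep, count, chars)
  | f, c :: cs, res, deep, count, chars =>
    let chars1 := if 0 < deep then chars ++ [c] else chars
    if pvNums.contains c ∧ deep = 0 then
      uRun f cs res deep (count ++ [c]) chars1
    else if c = '[' then
      uRun f cs res (deep + 1) count chars1
    else if c = ']' then
      if deep - 1 = 0 then
        match f with
        | 0 => none
        | f' + 1 =>
          match uRun f' chars1 [] 0 [] [] with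
          | none => none
          | some (r, _, _, _) =>
            match PySem.Int.ofChars? count with
            | none => none
            | some n =>
              uRun (f' + 1) cs (res ++ (List.replicate n.toNat r).flatten) (deep - 1) [] []
      else uRun f cs res (deep - 1) count chars1
    else if deep = 0 then
      uRun f cs (res ++ [c]) deep count chars1
    else
      uRun f cs res deep count chars1
termination_by f rest _ _ _ _ => (f, rest.length)
decreasing_by all_goals (simp_wf <;> omega)

def uncompreStr (s : String) : String :=
  match uRun (s.toList.length + 2) s.toList [] 0 [] [] with
  | none => ""
  | some (res, _, _, _) => String.ofList res

-- ===== PORT B =====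
-- state of Source B's loop: (stack, digits, cur); `none` marks the raising paths
-- (int of an empty count at a push, pop from an empty stack), all outside Pre_.
def bRun : List Char → List (Int × List Char) → List Char → List Char →
    Option (List (Int × List Char) × List Char × List Char)
  | [], stack, digits, cur => some (stack, digits, cur)
  | c :: cs, stack, digits, cur =>
    if c = '[' then
      match PySem.Int.ofChars? digits with
      | none => none
      | some n => bRun cs ((n, cur) :: stack) [] []
    else if c = ']' then
      match stack with
      | [] => none
      | (n, prev) :: stack' => bRun cs stack' [] (prev ++ (List.replicate n.toNat cur).flatten)
    else if PySem.Chars.isdigit c then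
      bRun cs stack (digits ++ [c]) cur
    else
      bRun cs stack digits (cur ++ [c])

def uncompreStr_alt (s : String) : String :=
  match bRun s.toList [] [] [] with
  | none => ""
  | some (_, _, cur) => String.ofList cur

-- ===== PRECONDITION & SPEC =====
-- helpers for Pre_: bracket balance and "each '[' is directly preceded by a digit"
def pvBalOk : List Char → Int → Bool
  | [], _ => true
  | c :: cs, d =>
    if c = '[' then pvBalOk cs (d + 1)
    else if c = ']' then decide (0 < d) && pvBalOk cs (d - 1)
    else pvBalOk cs d

def pvEndDepth : List Char → Int → Int
  | [], d => d
  | c :: cs, d =>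
    if c = '[' then pvEndDepth cs (d + 1)
    else if c = ']' then pvEndDepth cs (d - 1)
    else pvEndDepth cs d

-- "every '[' carries a repeat count": a digit occurs between the previous bracket (or the start)
-- and the '[' (the flag records "digit seen since the last bracket")
def pvCountOk : List Char → Bool → Bool
  | [], _ => true
  | c :: cs, seen =>
    if c = '[' then seen && pvCountOk cs false
    else if c = ']' then pvCountOk cs false
    else if PySem.Chars.isdigit c then pvCountOk cs true
    else pvCountOk cs seen

-- Pre_ restricts to well-formed encodings: balanced brackets, every '[' carrying a repeat count.
-- Outside it A raises ValueError (int of an empty count at a countless group) or returns accidental values of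
-- its stray-bracket state (a ']' at depth 0 makes deep negative and drops following text; an
-- unclosed '[' drops the pending group), which are not part of the encoding's meaning.
def Pre_uncompreStr (s : String) : Prop :=
  pvBalOk s.toList 0 = true ∧ pvEndDepth s.toList 0 = 0 ∧ pvCountOk s.toList false = true
instance (s : String) : Decidable (Pre_uncompreStr s) := by unfold Pre_uncompreStr; infer_instance

def pvWitness_uncompreStr : String := "ab2[x10[yz]]3[q]"

def Spec_uncompreStr (s : String) (out : String) : Prop := out = uncompreStr_alt s
instance (s : String) (out : String) : Decidable (Spec_uncompreStr s out) := by
  unfold Spec_uncompreStr; infer_instance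

-- ===== CLAIM (what is proved, stated in full; the proofs are below) =====
def Claim_equal_uncompreStr : Prop :=
  ∀ (s : String), Dom_uncompreStr s → Pre_uncompreStr s → Spec_uncompreStr s (uncompreStr s)

-- ===== LEMMAS AND PROOFS =====

-- A tests membership in its digit list, Source B tests isdigit(): the same character class.
theorem pvDigitBranch (c : Char) : (pvNums.contains c) = PySem.Chars.isdigit c := by
  have hchar : ∀ d : Char, c = d ↔ c.toNat = d.toNat := fun d => eq_iff_eq_of_cmp_eq_cmp rfl
  by_cases hd : 48 ≤ c.toNat ∧ c.toNat ≤ 57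
  · have hn : c.toNat = 48 ∨ c.toNat = 49 ∨ c.toNat = 50 ∨ c.toNat = 51 ∨ c.toNat = 52 ∨
        c.toNat = 53 ∨ c.toNat = 54 ∨ c.toNat = 55 ∨ c.toNat = 56 ∨ c.toNat = 57 := by omega
    rcases hn with h|h|h|h|h|h|h|h|h|h
    · rw [(hchar '0').mpr (by rw [h]; decide)]; decide
    · rw [(hchar '1').mpr (by rw [h]; decide)]; decide
    · rw [(hchar '2').mpr (by rw [h]; decide)]; decide
    · rw [(hchar '3').mpr (by rw [h]; decide)]; decide
    · rw [(hchar '4').mpr (by rw [h]; decide)]; decide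
    · rw [(hchar '5').mpr (by rw [h]; decide)]; decide
    · rw [(hchar '6').mpr (by rw [h]; decide)]; decide
    · rw [(hchar '7').mpr (by rw [h]; decide)]; decide
    · rw [(hchar '8').mpr (by rw [h]; decide)]; decide
    · rw [(hchar '9').mpr (by rw [h]; decide)]; decide
  · have hL : (pvNums.contains c) = false := by
      apply Bool.eq_false_iff.mpr; intro htr
      have hmem : c ∈ pvNums := by simpa [pvNums] using htr
      simp only [pvNums, List.mem_cons, List.not_mem_nil, or_false] at hmem
      rcases hmem with h|h|h|h|h|h|h|h|h|h <;> (subst h; exact hd (by decide))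
    have hR : PySem.Chars.isdigit c = false := by
      apply Bool.eq_false_iff.mpr; intro htr
      simp only [PySem.Chars.isdigit, Bool.and_eq_true, decide_eq_true_eq, Char.le_def,
        UInt32.le_iff_toNat_le] at htr
      exact hd ⟨htr.1, htr.2⟩
    rw [hL, hR]

theorem pvDigitNotBracket (c : Char) (h : PySem.Chars.isdigit c = true) : c ≠ '[' ∧ c ≠ ']' := by
  constructor <;> intro hc <;> rw [hc] at h <;> exact absurd h (by decide)

theorem pvBalOk_append (u v : List Char) (d : Int) :
    pvBalOk (u ++ v) d = (pvBalOk u d && pvBalOk v (pvEndDepth u d)) := by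
  induction u generalizing d with
  | nil => simp [pvBalOk, pvEndDepth]
  | cons c cs ih =>
    simp only [List.cons_append, pvBalOk, pvEndDepth]
    split_ifs <;> simp [ih, Bool.and_assoc]

theorem pvEndDepth_append (u v : List Char) (d : Int) :
    pvEndDepth (u ++ v) d = pvEndDepth v (pvEndDepth u d) := by
  induction u generalizing d with
  | nil => simp [pvEndDepth]
  | cons c cs ih =>
    simp only [List.cons_append, pvEndDepth]
    split_ifs <;> simp [ih]

theorem bRun_append (u v : List Char) (st : List (Int × List Char)) (dg cu : List Char) :
    bRun (u ++ v) st dg cu = (bRun u st dg cu).bind (fun t => bRun v t.1 t.2.1 t.2.2) := by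
  induction u generalizing st dg cu with
  | nil => simp [bRun]
  | cons c cs ih =>
    simp only [List.cons_append, bRun]
    split_ifs with h1 h2 h3
    · cases PySem.Int.ofChars? dg <;> simp [ih]
    · cases st with
      | nil => simp
      | cons p st' => cases p; simp [ih]
    · exact ih _ _ _
    · exact ih _ _ _

theorem uRun_append (f : Nat) (u v res : List Char) (deep : Int) (count chars : List Char) :
    uRun f (u ++ v) res deep count chars =
      (uRun f u res deep count chars).bind (fun t => uRun f v t.1 t.2.1 t.2.2.1 t.2.2.2) := by
  induction u generalizing res deep count chars with
  | nil => simp [uRun]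
  | cons c cs ih =>
    cases f with
    | zero =>
      rw [List.cons_append, uRun.eq_2, uRun.eq_2]
      split_ifs <;> first | exact ih _ _ _ _ | rfl
    | succ f' =>
      rw [List.cons_append, uRun.eq_3, uRun.eq_3]
      split_ifs <;> (try exact ih _ _ _ _) <;> simp only [ih] <;>
        first
        | (cases uRun f' (chars ++ [c]) [] 0 [] [] with
            | none => rfl
            | some t =>
              obtain ⟨r, d2, c2, ch2⟩ := t
              cases PySem.Int.ofChars? count with
              | none => rfl
              | some n => rfl)
        | (cases uRun f' chars [] 0 [] [] with
            | none => rfl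
            | some t =>
              obtain ⟨r, d2, c2, ch2⟩ := t
              cases PySem.Int.ofChars? count with
              | none => rfl
              | some n => rfl)

-- run Source B's loop from an optional state (none = an exception already raised)
def pvBRunO (rest : List Char)
    (t? : Option (List (Int × List Char) × List Char × List Char)) :
    Option (List (Int × List Char) × List Char × List Char) :=
  t?.bind (fun t => bRun rest t.1 t.2.1 t.2.2)

theorem pvBRunO_cons_none (c : Char) (cs : List Char) :
    pvBRunO (c :: cs) none = pvBRunO cs none := rfl

-- the simulation invariant between A's loop state and B's loop state
def pvInv (f : Nat) (rest res : List Char) (deep : Int) (count chars : List Char)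
    (t? : Option (List (Int × List Char) × List Char × List Char)) : Prop :=
  pvBalOk rest deep = true ∧ pvEndDepth rest deep = 0 ∧
  ( (deep = 0 ∧ chars = [] ∧ t? = some ([], count, res) ∧ rest.length + 2 ≤ f)
  ∨ (1 ≤ deep ∧ rest.length + chars.length + 3 ≤ f ∧
      pvBalOk chars 0 = true ∧ pvEndDepth chars 0 = deep - 1 ∧
      ( (∃ n₀ S dg cu, PySem.Int.ofChars? count = some n₀ ∧
          (S.length : Int) = deep - 1 ∧
          bRun chars [] [] [] = some (S, dg, cu) ∧
          t? = some (S ++ [(n₀, res)], dg, cu))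
      ∨ (t? = none ∧
          (PySem.Int.ofChars? count = none ∨ bRun chars [] [] [] = none)) ) ) )


-- ---- single-step characterizations of the two loops ----

theorem bRun_cons_open {cs : List Char} {st : List (Int × List Char)} {dg cu : List Char} {n : Int}
    (h : PySem.Int.ofChars? dg = some n) :
    bRun ('[' :: cs) st dg cu = bRun cs ((n, cu) :: st) [] [] := by
  cases st with
  | nil => rw [bRun.eq_2]; simp [h]
  | cons p st' => obtain ⟨a, b⟩ := p; rw [bRun.eq_3]; simp [h]

theorem bRun_cons_open_none {cs : List Char} {st : List (Int × List Char)} {dg cu : List Char}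
    (h : PySem.Int.ofChars? dg = none) :
    bRun ('[' :: cs) st dg cu = none := by
  cases st with
  | nil => rw [bRun.eq_2]; simp [h]
  | cons p st' => obtain ⟨a, b⟩ := p; rw [bRun.eq_3]; simp [h]

theorem bRun_cons_close {cs : List Char} {st : List (Int × List Char)} {dg cu prev : List Char}
    {n : Int} :
    bRun (']' :: cs) ((n, prev) :: st) dg cu
      = bRun cs st [] (prev ++ (List.replicate n.toNat cu).flatten) := by
  rw [bRun.eq_3]; simp

theorem bRun_cons_digit {c : Char} {cs : List Char} {st : List (Int × List Char)} {dg cu : List Char}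
    (h : PySem.Chars.isdigit c = true) :
    bRun (c :: cs) st dg cu = bRun cs st (dg ++ [c]) cu := by
  obtain ⟨h1, h2⟩ := pvDigitNotBracket c h
  cases st with
  | nil => rw [bRun.eq_2]; simp [h1, h2, h]
  | cons p st' => obtain ⟨a, b⟩ := p; rw [bRun.eq_3]; simp [h1, h2, h]

theorem bRun_cons_other {c : Char} {cs : List Char} {st : List (Int × List Char)} {dg cu : List Char}
    (h1 : c ≠ '[') (h2 : c ≠ ']') (h3 : PySem.Chars.isdigit c = false) :
    bRun (c :: cs) st dg cu = bRun cs st dg (cu ++ [c]) := by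
  cases st with
  | nil => rw [bRun.eq_2]; simp [h1, h2, h3]
  | cons p st' => obtain ⟨a, b⟩ := p; rw [bRun.eq_3]; simp [h1, h2, h3]

theorem uRun_cons_digit0 {f : Nat} {c : Char} {cs res count chars : List Char}
    (h : PySem.Chars.isdigit c = true) :
    uRun f (c :: cs) res 0 count chars = uRun f cs res 0 (count ++ [c]) chars := by
  have hmem : c ∈ pvNums := by
    have hc : pvNums.contains c = true := by rw [pvDigitBranch]; exact h
    simpa using hc
  cases f with
  | zero => rw [uRun.eq_2]; simp [hmem]
  | succ f' => rw [uRun.eq_3]; simp [hmem]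

theorem uRun_cons_digit_deep {f : Nat} {c : Char} {cs res count chars : List Char} {deep : Int}
    (h : PySem.Chars.isdigit c = true) (hd : 1 ≤ deep) :
    uRun f (c :: cs) res deep count chars = uRun f cs res deep count (chars ++ [c]) := by
  have hmem : c ∈ pvNums := by
    have hc : pvNums.contains c = true := by rw [pvDigitBranch]; exact h
    simpa using hc
  obtain ⟨h1, h2⟩ := pvDigitNotBracket c h
  have hd0 : ¬(deep = 0) := by omega
  have hdpos : 0 < deep := by omega
  cases f with
  | zero => rw [uRun.eq_2]; simp [h1, h2, hd0, hdpos]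
  | succ f' => rw [uRun.eq_3]; simp [h1, h2, hd0, hdpos]

theorem uRun_cons_open0 {f : Nat} {cs res count chars : List Char} :
    uRun f ('[' :: cs) res 0 count chars = uRun f cs res 1 count chars := by
  cases f with
  | zero => rw [uRun.eq_2]; simp [pvNums]
  | succ f' => rw [uRun.eq_3]; simp [pvNums]

theorem uRun_cons_open_deep {f : Nat} {cs res count chars : List Char} {deep : Int}
    (hd : 1 ≤ deep) :
    uRun f ('[' :: cs) res deep count chars = uRun f cs res (deep + 1) count (chars ++ ['[']) := by
  have hd0 : ¬(deep = 0) := by omega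
  have hdpos : 0 < deep := by omega
  cases f with
  | zero => rw [uRun.eq_2]; simp [pvNums, hd0, hdpos]
  | succ f' => rw [uRun.eq_3]; simp [pvNums, hd0, hdpos]

theorem uRun_cons_other0 {f : Nat} {c : Char} {cs res count chars : List Char}
    (h1 : c ≠ '[') (h2 : c ≠ ']') (h3 : PySem.Chars.isdigit c = false) :
    uRun f (c :: cs) res 0 count chars = uRun f cs (res ++ [c]) 0 count chars := by
  have hnm : c ∉ pvNums := by
    have hc : pvNums.contains c = false := by rw [pvDigitBranch]; exact h3
    simpa using hc
  cases f with
  | zero => rw [uRun.eq_2]; simp [hnm, h1, h2]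
  | succ f' => rw [uRun.eq_3]; simp [hnm, h1, h2]

theorem uRun_cons_other_deep {f : Nat} {c : Char} {cs res count chars : List Char} {deep : Int}
    (h1 : c ≠ '[') (h2 : c ≠ ']') (h3 : PySem.Chars.isdigit c = false) (hd : 1 ≤ deep) :
    uRun f (c :: cs) res deep count chars = uRun f cs res deep count (chars ++ [c]) := by
  have hnm : c ∉ pvNums := by
    have hc : pvNums.contains c = false := by rw [pvDigitBranch]; exact h3
    simpa using hc
  have hd0 : ¬(deep = 0) := by omega
  have hdpos : 0 < deep := by omega
  cases f with
  | zero => rw [uRun.eq_2]; simp [hnm, h1, h2, hd0, hdpos]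
  | succ f' => rw [uRun.eq_3]; simp [hnm, h1, h2, hd0, hdpos]

theorem uRun_cons_close_deep {f : Nat} {cs res count chars : List Char} {deep : Int}
    (hd : 2 ≤ deep) :
    uRun f (']' :: cs) res deep count chars
      = uRun f cs res (deep - 1) count (chars ++ [']']) := by
  have hd0 : ¬(deep = 0) := by omega
  have hdpos : 0 < deep := by omega
  have hdm : ¬(deep - 1 = 0) := by omega
  cases f with
  | zero => rw [uRun.eq_2]; simp [pvNums, hd0, hdpos, hdm]
  | succ f' => rw [uRun.eq_3]; simp [pvNums, hd0, hdpos, hdm]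

theorem uRun_cons_close1 {f' : Nat} {cs res count chars : List Char} :
    uRun (f' + 1) (']' :: cs) res 1 count chars
      = match uRun f' (chars ++ [']']) [] 0 [] [] with
        | none => none
        | some (r, _, _, _) =>
          match PySem.Int.ofChars? count with
          | none => none
          | some n => uRun (f' + 1) cs (res ++ (List.replicate n.toNat r).flatten) 0 [] [] := by
  rw [uRun.eq_3]; simp [pvNums]

theorem uRun_cons_close0 {f : Nat} {cs res count chars : List Char} :
    uRun f (']' :: cs) res 0 count chars = uRun f cs res (-1) count chars := by
  cases f with
  | zero => rw [uRun.eq_2]; simp [pvNums]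
  | succ f' => rw [uRun.eq_3]; simp [pvNums]

theorem pvMain : ∀ (f : Nat) (rest res : List Char) (deep : Int) (count chars : List Char)
    (t? : Option (List (Int × List Char) × List Char × List Char)),
    pvInv f rest res deep count chars t? →
    ( (uRun f rest res deep count chars = none ∧ pvBRunO rest t? = none)
    ∨ (∃ r d cnt ch stk dg, uRun f rest res deep count chars = some (r, d, cnt, ch) ∧
        pvBRunO rest t? = some (stk, dg, r) ∧ d = 0) ) := by
  intro f
  induction f with
  | zero =>
    intro rest res deep count chars t? hInv
    obtain ⟨-, -, hcase⟩ := hInv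
    rcases hcase with ⟨-, -, -, hf⟩ | ⟨-, hf, -⟩ <;> omega
  | succ f' ihf =>
    intro rest
    induction rest with
    | nil =>
      intro res deep count chars t? hInv
      obtain ⟨hBal, hEnd, hcase⟩ := hInv
      have hd : deep = 0 := by simpa [pvEndDepth] using hEnd
      rcases hcase with ⟨-, hch, ht, -⟩ | ⟨hd1, -⟩
      · subst hd; subst hch; subst ht
        right
        exact ⟨res, 0, count, [], [], count, by rw [uRun.eq_1], by simp [pvBRunO, bRun], rfl⟩
      · omega
    | cons c cs ihr =>
      intro res deep count chars t? hInv
      obtain ⟨hBal, hEnd, hcase⟩ := hInv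
      rcases hcase with ⟨hd, hch, ht, hf⟩ | ⟨hd1, hf, hbc, hec, hsub⟩
      · -- current depth 0
        subst hd; subst hch; subst ht
        by_cases hb1 : c = '['
        · subst hb1
          rw [uRun_cons_open0]
          cases hoc : PySem.Int.ofChars? count with
          | some n =>
            have hB : pvBRunO ('[' :: cs) (some ([], count, res))
                = pvBRunO cs (some ([(n, res)], [], [])) := by
              simp [pvBRunO, bRun_cons_open hoc]
            rw [hB]
            apply ihr
            refine ⟨by simpa [pvBalOk] using hBal, by simpa [pvEndDepth] using hEnd,
              Or.inr ⟨by omega, ?_, rfl, by norm_num [pvEndDepth],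
                Or.inl ⟨n, [], [], [], hoc, by simp, rfl, rfl⟩⟩⟩
            simp only [List.length_cons, List.length_nil] at hf ⊢
            omega
          | none =>
            have hB : pvBRunO ('[' :: cs) (some ([], count, res)) = pvBRunO cs none := by
              simp [pvBRunO, bRun_cons_open_none hoc]
            rw [hB]
            apply ihr
            refine ⟨by simpa [pvBalOk] using hBal, by simpa [pvEndDepth] using hEnd,
              Or.inr ⟨by omega, ?_, rfl, by norm_num [pvEndDepth], Or.inr ⟨rfl, Or.inl hoc⟩⟩⟩
            simp only [List.length_cons, List.length_nil] at hf ⊢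
            omega
        · by_cases hb2 : c = ']'
          · exfalso
            subst hb2
            simp [pvBalOk] at hBal
          · by_cases hdig : PySem.Chars.isdigit c = true
            · rw [uRun_cons_digit0 hdig]
              have hB : pvBRunO (c :: cs) (some ([], count, res))
                  = pvBRunO cs (some ([], count ++ [c], res)) := by
                simp [pvBRunO, bRun_cons_digit hdig]
              rw [hB]
              apply ihr
              refine ⟨by simpa [pvBalOk, hb1, hb2] using hBal,
                by simpa [pvEndDepth, hb1, hb2] using hEnd,
                Or.inl ⟨rfl, rfl, rfl, ?_⟩⟩
              simp only [List.length_cons] at hf ⊢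
              omega
            · have hd3 : PySem.Chars.isdigit c = false := by simpa using hdig
              rw [uRun_cons_other0 hb1 hb2 hd3]
              have hB : pvBRunO (c :: cs) (some ([], count, res))
                  = pvBRunO cs (some ([], count, res ++ [c])) := by
                simp [pvBRunO, bRun_cons_other hb1 hb2 hd3]
              rw [hB]
              apply ihr
              refine ⟨by simpa [pvBalOk, hb1, hb2] using hBal,
                by simpa [pvEndDepth, hb1, hb2] using hEnd,
                Or.inl ⟨rfl, rfl, rfl, ?_⟩⟩
              simp only [List.length_cons] at hf ⊢
              omega
      · -- current depth ≥ 1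
        have hdpos : (0 : Int) < deep := by omega
        rcases hsub with ⟨n₀, S, dg, cu, hoc, hSl, hbr, ht⟩ | ⟨ht, hdoom⟩
        · -- normal (B alive) case
          subst ht
          by_cases hb1 : c = '['
          · subst hb1
            rw [uRun_cons_open_deep hd1]
            cases hoc2 : PySem.Int.ofChars? dg with
            | some m =>
              have hB : pvBRunO ('[' :: cs) (some (S ++ [(n₀, res)], dg, cu))
                  = pvBRunO cs (some ((m, cu) :: S ++ [(n₀, res)], [], [])) := by
                simp [pvBRunO, bRun_cons_open hoc2]
              rw [hB]
              have hbr' : bRun (chars ++ ['[']) [] [] [] = some ((m, cu) :: S, [], []) := by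
                rw [bRun_append, hbr]
                exact bRun_cons_open hoc2
              apply ihr
              refine ⟨by simpa [pvBalOk, hdpos] using hBal,
                by simpa [pvEndDepth] using hEnd,
                Or.inr ⟨by omega, ?_, ?_, ?_, Or.inl ⟨n₀, (m, cu) :: S, [], [], hoc, ?_, hbr', rfl⟩⟩⟩
              · simp only [List.length_cons, List.length_append, List.length_nil] at hf ⊢
                omega
              · rw [pvBalOk_append]
                simp [pvBalOk, hbc]
              · rw [pvEndDepth_append, hec]
                simp [pvEndDepth]
              · simp only [List.length_cons]
                push_cast
                omega
            | none =>
              have hB : pvBRunO ('[' :: cs) (some (S ++ [(n₀, res)], dg, cu)) = pvBRunO cs none := by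
                simp [pvBRunO, bRun_cons_open_none hoc2]
              rw [hB]
              have hbr' : bRun (chars ++ ['[']) [] [] [] = none := by
                rw [bRun_append, hbr]
                exact bRun_cons_open_none hoc2
              apply ihr
              refine ⟨by simpa [pvBalOk, hdpos] using hBal,
                by simpa [pvEndDepth] using hEnd,
                Or.inr ⟨by omega, ?_, ?_, ?_, Or.inr ⟨rfl, Or.inr hbr'⟩⟩⟩
              · simp only [List.length_cons, List.length_append, List.length_nil] at hf ⊢
                omega
              · rw [pvBalOk_append]
                simp [pvBalOk, hbc]
              · rw [pvEndDepth_append, hec]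
                simp [pvEndDepth]
          · by_cases hb2 : c = ']'
            · subst hb2
              by_cases hdeq : deep = 1
              · -- the matching close of the pending group
                subst hdeq
                have hS0 : S.length = 0 := by omega
                have hS : S = [] := List.eq_nil_of_length_eq_zero hS0
                subst hS
                rw [uRun_cons_close1]
                have hInvC : pvInv f' chars [] 0 [] [] (some ([], [], [])) := by
                  refine ⟨hbc, by simpa using hec, Or.inl ⟨rfl, rfl, rfl, ?_⟩⟩
                  simp only [List.length_cons] at hf
                  omega
                rcases ihf chars [] 0 [] [] (some ([], [], [])) hInvC with
                  ⟨hA2, hB2⟩ | ⟨r2, d2, cnt2, ch2, stk2, dg2, hA2, hB2, hd2⟩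
                · exfalso
                  simp [pvBRunO, hbr] at hB2
                · subst hd2
                  have hx : stk2 = [] ∧ dg2 = dg ∧ r2 = cu := by
                    simp [pvBRunO, hbr] at hB2
                    tauto
                  obtain ⟨-, -, hr2⟩ := hx
                  rw [hr2] at hA2
                  have hrec : uRun f' (chars ++ [']']) [] 0 [] [] = some (cu, -1, cnt2, ch2) := by
                    rw [uRun_append, hA2]
                    show uRun f' (']' :: []) cu 0 cnt2 ch2 = _
                    rw [uRun_cons_close0, uRun.eq_1]
                  rw [hrec, hoc]
                  have hB : pvBRunO (']' :: cs) (some ([] ++ [(n₀, res)], dg, cu))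
                      = pvBRunO cs
                          (some ([], [], res ++ (List.replicate n₀.toNat cu).flatten)) := by
                    simp [pvBRunO, bRun_cons_close]
                  rw [hB]
                  apply ihr
                  refine ⟨by simpa [pvBalOk] using hBal, by simpa [pvEndDepth] using hEnd,
                    Or.inl ⟨rfl, rfl, rfl, ?_⟩⟩
                  simp only [List.length_cons] at hf ⊢
                  omega
              · -- closing an inner group
                have hd2 : (2 : Int) ≤ deep := by omega
                rw [uRun_cons_close_deep hd2]
                cases S with
                | nil =>
                  exfalso
                  simp only [List.length_nil] at hSl
                  omega
                | cons p S₁ =>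
                  obtain ⟨n₁, p₁⟩ := p
                  have hB : pvBRunO (']' :: cs) (some ((n₁, p₁) :: S₁ ++ [(n₀, res)], dg, cu))
                      = pvBRunO cs
                          (some (S₁ ++ [(n₀, res)], [], p₁ ++ (List.replicate n₁.toNat cu).flatten)) := by
                    simp [pvBRunO, bRun_cons_close]
                  rw [hB]
                  have hbr' : bRun (chars ++ [']']) [] [] []
                      = some (S₁, [], p₁ ++ (List.replicate n₁.toNat cu).flatten) := by
                    rw [bRun_append, hbr]
                    exact bRun_cons_close
                  apply ihr
                  refine ⟨by simpa [pvBalOk, hdpos] using hBal,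
                    by simpa [pvEndDepth] using hEnd,
                    Or.inr ⟨by omega, ?_, ?_, ?_, Or.inl ⟨n₀, S₁, [], _, hoc, ?_, hbr', rfl⟩⟩⟩
                  · simp only [List.length_cons, List.length_append, List.length_nil] at hf ⊢
                    omega
                  · rw [pvBalOk_append]
                    have : (0 : Int) < pvEndDepth chars 0 := by rw [hec]; omega
                    simp [pvBalOk, hbc, this]
                  · rw [pvEndDepth_append, hec]
                    simp [pvEndDepth]
                  · simp only [List.length_cons] at hSl ⊢
                    push_cast at hSl ⊢
                    omega
            · -- an ordinary character inside a group
              by_cases hdig : PySem.Chars.isdigit c = true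
              · rw [uRun_cons_digit_deep hdig hd1]
                have hB : pvBRunO (c :: cs) (some (S ++ [(n₀, res)], dg, cu))
                    = pvBRunO cs (some (S ++ [(n₀, res)], dg ++ [c], cu)) := by
                  simp [pvBRunO, bRun_cons_digit hdig]
                rw [hB]
                have hbr' : bRun (chars ++ [c]) [] [] [] = some (S, dg ++ [c], cu) := by
                  rw [bRun_append, hbr]
                  exact bRun_cons_digit hdig
                apply ihr
                refine ⟨by simpa [pvBalOk, hb1, hb2] using hBal,
                  by simpa [pvEndDepth, hb1, hb2] using hEnd,
                  Or.inr ⟨by omega, ?_, ?_, ?_, Or.inl ⟨n₀, S, dg ++ [c], cu, hoc, hSl, hbr', rfl⟩⟩⟩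
                · simp only [List.length_cons, List.length_append, List.length_nil] at hf ⊢
                  omega
                · rw [pvBalOk_append]
                  simp [pvBalOk, hbc, hb1, hb2]
                · rw [pvEndDepth_append, hec]
                  simp [pvEndDepth, hb1, hb2]
              · have hd3 : PySem.Chars.isdigit c = false := by simpa using hdig
                rw [uRun_cons_other_deep hb1 hb2 hd3 hd1]
                have hB : pvBRunO (c :: cs) (some (S ++ [(n₀, res)], dg, cu))
                    = pvBRunO cs (some (S ++ [(n₀, res)], dg, cu ++ [c])) := by
                  simp [pvBRunO, bRun_cons_other hb1 hb2 hd3]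
                rw [hB]
                have hbr' : bRun (chars ++ [c]) [] [] [] = some (S, dg, cu ++ [c]) := by
                  rw [bRun_append, hbr]
                  exact bRun_cons_other hb1 hb2 hd3
                apply ihr
                refine ⟨by simpa [pvBalOk, hb1, hb2] using hBal,
                  by simpa [pvEndDepth, hb1, hb2] using hEnd,
                  Or.inr ⟨by omega, ?_, ?_, ?_, Or.inl ⟨n₀, S, dg, cu ++ [c], hoc, hSl, hbr', rfl⟩⟩⟩
                · simp only [List.length_cons, List.length_append, List.length_nil] at hf ⊢
                  omega
                · rw [pvBalOk_append]
                  simp [pvBalOk, hbc, hb1, hb2]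
                · rw [pvEndDepth_append, hec]
                  simp [pvEndDepth, hb1, hb2]
        · -- doomed case: B has already raised, A is bound to raise at the pending close
          subst ht
          have hdoomStep : ∀ c' : Char, (PySem.Int.ofChars? count = none ∨ bRun chars [] [] [] = none) →
              (PySem.Int.ofChars? count = none ∨ bRun (chars ++ [c']) [] [] [] = none) := by
            intro c' h
            rcases h with h | h
            · exact Or.inl h
            · right
              rw [bRun_append, h]
              rfl
          by_cases hb1 : c = '['
          · subst hb1
            rw [uRun_cons_open_deep hd1, pvBRunO_cons_none]
            apply ihr
            refine ⟨by simpa [pvBalOk, hdpos] using hBal, by simpa [pvEndDepth] using hEnd,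
              Or.inr ⟨by omega, ?_, ?_, ?_, Or.inr ⟨rfl, hdoomStep '[' hdoom⟩⟩⟩
            · simp only [List.length_cons, List.length_append, List.length_nil] at hf ⊢
              omega
            · rw [pvBalOk_append]
              simp [pvBalOk, hbc]
            · rw [pvEndDepth_append, hec]
              simp [pvEndDepth]
          · by_cases hb2 : c = ']'
            · subst hb2
              by_cases hdeq : deep = 1
              · -- the pending close: A raises here as well
                subst hdeq
                left
                refine ⟨?_, rfl⟩
                rw [uRun_cons_close1]
                rcases hdoom with hocn | hbrn
                · cases hR : uRun f' (chars ++ [']']) [] 0 [] [] with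
                  | none => rfl
                  | some t =>
                    obtain ⟨r2, d2, c2, ch2⟩ := t
                    rw [hocn]
                · have hInvC : pvInv f' chars [] 0 [] [] (some ([], [], [])) := by
                    refine ⟨hbc, by simpa using hec, Or.inl ⟨rfl, rfl, rfl, ?_⟩⟩
                    simp only [List.length_cons] at hf
                    omega
                  rcases ihf chars [] 0 [] [] (some ([], [], [])) hInvC with
                    ⟨hA2, hB2⟩ | ⟨r2, d2, cnt2, ch2, stk2, dg2, hA2, hB2, hd2⟩
                  · rw [uRun_append, hA2]
                    rfl
                  · exfalso
                    simp [pvBRunO, hbrn] at hB2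
              · have hd2 : (2 : Int) ≤ deep := by omega
                rw [uRun_cons_close_deep hd2, pvBRunO_cons_none]
                apply ihr
                refine ⟨by simpa [pvBalOk, hdpos] using hBal, by simpa [pvEndDepth] using hEnd,
                  Or.inr ⟨by omega, ?_, ?_, ?_, Or.inr ⟨rfl, hdoomStep ']' hdoom⟩⟩⟩
                · simp only [List.length_cons, List.length_append, List.length_nil] at hf ⊢
                  omega
                · rw [pvBalOk_append]
                  have : (0 : Int) < pvEndDepth chars 0 := by rw [hec]; omega
                  simp [pvBalOk, hbc, this]
                · rw [pvEndDepth_append, hec]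
                  simp [pvEndDepth]
            · by_cases hdig : PySem.Chars.isdigit c = true
              · rw [uRun_cons_digit_deep hdig hd1, pvBRunO_cons_none]
                apply ihr
                refine ⟨by simpa [pvBalOk, hb1, hb2] using hBal,
                  by simpa [pvEndDepth, hb1, hb2] using hEnd,
                  Or.inr ⟨by omega, ?_, ?_, ?_, Or.inr ⟨rfl, hdoomStep c hdoom⟩⟩⟩
                · simp only [List.length_cons, List.length_append, List.length_nil] at hf ⊢
                  omega
                · rw [pvBalOk_append]
                  simp [pvBalOk, hbc, hb1, hb2]
                · rw [pvEndDepth_append, hec]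
                  simp [pvEndDepth, hb1, hb2]
              · have hd3 : PySem.Chars.isdigit c = false := by simpa using hdig
                rw [uRun_cons_other_deep hb1 hb2 hd3 hd1, pvBRunO_cons_none]
                apply ihr
                refine ⟨by simpa [pvBalOk, hb1, hb2] using hBal,
                  by simpa [pvEndDepth, hb1, hb2] using hEnd,
                  Or.inr ⟨by omega, ?_, ?_, ?_, Or.inr ⟨rfl, hdoomStep c hdoom⟩⟩⟩
                · simp only [List.length_cons, List.length_append, List.length_nil] at hf ⊢
                  omega
                · rw [pvBalOk_append]
                  simp [pvBalOk, hbc, hb1, hb2]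
                · rw [pvEndDepth_append, hec]
                  simp [pvEndDepth, hb1, hb2]

-- ===== VERDICT (by name: the statement is the Claim_ definition above) =====
theorem uncompreStr_spec : Claim_equal_uncompreStr := by
  intro s _hDom hPre
  unfold Spec_uncompreStr uncompreStr uncompreStr_alt
  obtain ⟨hBal, hEnd, _hDig⟩ := hPre
  have hInv : pvInv (s.toList.length + 2) s.toList [] 0 [] [] (some ([], [], [])) := by
    refine ⟨hBal, hEnd, Or.inl ⟨rfl, rfl, rfl, le_refl _⟩⟩
  rcases pvMain (s.toList.length + 2) s.toList [] 0 [] [] (some ([], [], [])) hInv with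
    ⟨hA, hB⟩ | ⟨r, d, cnt, ch, stk, dg, hA, hB, _⟩
  · rw [hA]
    simp only [pvBRunO, Option.bind] at hB
    rw [hB]
  · rw [hA]
    simp only [pvBRunO, Option.bind] at hB
    rw [hB]
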